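-- pv_equiv track=rewrite | github.com/1-5Pool/SocialExperimentAgents | backend/usecases/simulation.py | _distribute_personal_prompts
-- ===== SOURCE A (Python) =====
-- from typing import List, Dict, Any
--
-- def _distribute_personal_prompts(
--     prompts: List[str], agent_count: int
-- ) -> List[str]:
--     """Distribute personal prompts equally among agents"""
--     if not prompts:
--         return [""] * agent_count
--
--     if len(prompts) >= agent_count:
--         # More prompts than agents, just take the first agent_count prompts
--         return prompts[:agent_count]
--
--     # Fewer prompts than agents, distribute equally
--     distributed = []
--     prompts_per_group = agent_count // len(prompts)
--     remainder = agent_count % len(prompts)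
--
--     for i, prompt in enumerate(prompts):
--         # Add base amount for each prompt
--         count = prompts_per_group
--         # Add one extra for the first 'remainder' prompts
--         if i < remainder:
--             count += 1
--
--         distributed.extend([prompt] * count)
--
--     return distributed
-- ===== SOURCE B (Python) =====
-- from typing import List
--
-- def _distribute_personal_prompts(
--     prompts: List[str], agent_count: int
-- ) -> List[str]:
--     """Distribute personal prompts equally among agents"""
--     if not prompts:
--         return [""] * agent_count
--
--     if len(prompts) >= agent_count:
--         return prompts[:agent_count]
--
--     # Map each output slot to its source prompt with a closed-form index.
--     n = len(prompts)
--     q, r = divmod(agent_count, n)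
--     cut = r * (q + 1)
--     return [
--         prompts[j // (q + 1)] if j < cut else prompts[r + (j - cut) // q]
--         for j in range(agent_count)
--     ]
-- ===== Notes on version B (the rewrite author's own statement) =====
-- stated objective: alternative
-- what changed: The distribution branch maps each output slot j in range(agent_count) to its source prompt by a closed-form index (j//(q+1) below the remainder cut, else remainder+(j-cut)//q) instead of extending per-prompt replicated blocks.
import Mathlib
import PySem

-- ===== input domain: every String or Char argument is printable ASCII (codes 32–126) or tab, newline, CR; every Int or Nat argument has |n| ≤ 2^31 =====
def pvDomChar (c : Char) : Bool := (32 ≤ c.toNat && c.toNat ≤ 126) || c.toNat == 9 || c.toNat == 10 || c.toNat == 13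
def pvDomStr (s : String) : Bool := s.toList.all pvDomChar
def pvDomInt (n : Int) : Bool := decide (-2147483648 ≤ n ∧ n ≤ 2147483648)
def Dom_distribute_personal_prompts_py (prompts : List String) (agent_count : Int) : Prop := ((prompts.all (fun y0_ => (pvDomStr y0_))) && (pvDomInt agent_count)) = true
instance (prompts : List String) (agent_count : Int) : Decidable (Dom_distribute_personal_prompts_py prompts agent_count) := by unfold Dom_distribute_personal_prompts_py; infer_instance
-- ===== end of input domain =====

-- B replaces A's per-prompt block building with a direct map from output slots to
-- source prompts via a closed-form index (objective: alternative decomposition).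

-- ===== PORT A =====
def distribute_personal_prompts_py (prompts : List String) (agent_count : Int) : List String :=
  if prompts.isEmpty then
    PySem.List.pyRepeat [""] agent_count
  else if (prompts.length : Int) ≥ agent_count then
    PySem.List.slice prompts none (some agent_count)
  else
    let prompts_per_group := PySem.Int.floordiv agent_count (prompts.length : Int)
    let remainder := PySem.Int.mod agent_count (prompts.length : Int)
    (PySem.List.enumerate prompts 0).foldl
      (fun distributed ip =>
        let count := if ip.1 < remainder then prompts_per_group + 1 else prompts_per_group
        distributed ++ PySem.List.pyRepeat [ip.2] count)
      []

-- ===== PORT B =====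
-- In the last branch every computed index is provably in range, so the "" default
-- of pyGetD is never used (Python's prompts[...] never raises there).
def distribute_personal_prompts_py_alt (prompts : List String) (agent_count : Int) : List String :=
  if prompts.isEmpty then
    PySem.List.pyRepeat [""] agent_count
  else if (prompts.length : Int) ≥ agent_count then
    PySem.List.slice prompts none (some agent_count)
  else
    let n : Int := prompts.length
    let q := PySem.Int.floordiv agent_count n
    let r := PySem.Int.mod agent_count n
    let cut := r * (q + 1)
    (PySem.List.pyRange 0 agent_count 1).map (fun j =>
      if j < cut then PySem.List.pyGetD prompts (PySem.Int.floordiv j (q + 1)) ""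
      else PySem.List.pyGetD prompts (r + PySem.Int.floordiv (j - cut) q) "")

-- ===== PRECONDITION & SPEC =====
def Spec_distribute_personal_prompts_py (prompts : List String) (agent_count : Int) (out : List String) : Prop := out = distribute_personal_prompts_py_alt prompts agent_count
instance (prompts : List String) (agent_count : Int) (out : List String) : Decidable (Spec_distribute_personal_prompts_py prompts agent_count out) := by unfold Spec_distribute_personal_prompts_py; infer_instance

-- ===== CLAIM (what is proved, stated in full; the proofs are below) =====
def Claim_equal_distribute_personal_prompts_py : Prop := ∀ (prompts : List String) (agent_count : Int), Dom_distribute_personal_prompts_py prompts agent_count → Spec_distribute_personal_prompts_py prompts agent_count (distribute_personal_prompts_py prompts agent_count)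

-- ===== LEMMAS AND PROOFS =====

-- Mapping j ↦ xs[j / c] over range(len(xs) * c) produces xs's elements in c-blocks.
theorem pv_map_range_div (xs : List String) (c : Nat) :
    (List.range (xs.length * c)).map (fun j => xs.getD (j / c) "")
      = xs.flatMap (fun p => List.replicate c p) := by
  rcases Nat.eq_zero_or_pos c with hc | hc
  · subst hc; simp
  · induction xs with
    | nil => simp
    | cons x xs ih =>
      have hlen : (x :: xs).length * c = c + xs.length * c := by
        simp [List.length_cons]; ring
      rw [hlen, List.range_add, List.map_append, List.map_map, List.flatMap_cons]
      congr 1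
      · have h1 : ∀ j ∈ List.range c, (x :: xs).getD (j / c) "" = x := by
          intro j hj
          rw [List.mem_range] at hj
          rw [Nat.div_eq_of_lt hj, List.getD_cons_zero]
        rw [List.map_congr_left h1, List.map_const', List.length_range]
      · have h2 : ∀ j ∈ List.range (xs.length * c),
            ((fun j => (x :: xs).getD (j / c) "") ∘ (c + ·)) j = xs.getD (j / c) "" := by
          intro j _
          simp only [Function.comp]
          rw [Nat.add_div_left j hc, List.getD_cons_succ]
        rw [List.map_congr_left h2, ih]

-- A's enumerate-loop, with counts q+1 before index r and q after, is the
-- take/drop-at-(r - s) block decomposition.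
theorem pv_enum_blocks (ps : List String) (s r q : Nat) :
    (PySem.List.enumerate ps (s : Int)).flatMap
        (fun ip => List.replicate (if ip.1 < (r : Int) then q + 1 else q) ip.2)
      = (ps.take (r - s)).flatMap (fun p => List.replicate (q + 1) p)
        ++ (ps.drop (r - s)).flatMap (fun p => List.replicate q p) := by
  induction ps generalizing s with
  | nil => simp
  | cons x xs ih =>
    rw [PySem.List.enumerate_cons, List.flatMap_cons]
    have hs1 : ((s : Int) + 1) = ((s + 1 : Nat) : Int) := by push_cast; ring
    by_cases h : s < r
    · rw [if_pos (show ((s : Int), x).1 < (r : Int) by show (s : Int) < (r : Int); exact_mod_cast h)]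
      have hr : r - s = (r - (s + 1)) + 1 := by omega
      rw [hr, List.take_succ_cons, List.drop_succ_cons, List.flatMap_cons,
        List.append_assoc, hs1, ih (s + 1)]
    · rw [if_neg (show ¬ ((s : Int), x).1 < (r : Int) by show ¬ (s : Int) < (r : Int); exact_mod_cast h)]
      have hr0 : r - s = 0 := by omega
      have hr1 : r - (s + 1) = 0 := by omega
      rw [hr0, List.take_zero, List.drop_zero, List.flatMap_nil, List.nil_append,
        List.flatMap_cons, hs1, ih (s + 1), hr1]
      simp

-- pyRepeat of a singleton with A's Int count is replicate with the Nat count.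
theorem pv_pyRepeat_count (r q : Nat) (ip : Int × String) :
    PySem.List.pyRepeat [ip.2] (if ip.1 < (r : Int) then (q : Int) + 1 else (q : Int))
      = List.replicate (if ip.1 < (r : Int) then q + 1 else q) ip.2 := by
  rw [PySem.List.pyRepeat_singleton]
  congr 1
  split_ifs <;> omega

theorem distribute_personal_prompts_py_spec' (prompts : List String) (agent_count : Int) :
    distribute_personal_prompts_py prompts agent_count
      = distribute_personal_prompts_py_alt prompts agent_count := by
  simp only [distribute_personal_prompts_py, distribute_personal_prompts_py_alt]
  split_ifs with h1 h2
  · rfl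
  · rfl
  · -- distribution branch: prompts nonempty, len(prompts) < agent_count
    have hn : 0 < prompts.length := by
      cases prompts with
      | nil => simp at h1
      | cons a l => simp
    have hlt : (prompts.length : Int) < agent_count := by omega
    obtain ⟨m, hm⟩ : ∃ m : Nat, agent_count = (m : Int) := ⟨agent_count.toNat, by omega⟩
    subst hm
    have hnm : prompts.length < m := by exact_mod_cast hlt
    rw [PySem.Int.floordiv_natCast, PySem.Int.mod_natCast]
    set q : Nat := m / prompts.length with hq_def
    set r : Nat := m % prompts.length with hr_def
    have hrn : r < prompts.length := by rw [hr_def]; exact Nat.mod_lt _ hn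
    have hkey : r * (q + 1) + (prompts.length - r) * q = m := by
      have hd : prompts.length * q + r = m := by rw [hq_def, hr_def]; exact Nat.div_add_mod m prompts.length
      have h2' : (prompts.length - r) * q = prompts.length * q - r * q := Nat.sub_mul prompts.length r q
      have h3 : r * q ≤ prompts.length * q := Nat.mul_le_mul_right q (le_of_lt hrn)
      calc r * (q + 1) + (prompts.length - r) * q
          = r * q + r + (prompts.length * q - r * q) := by rw [h2']; ring_nf
        _ = r + (r * q + (prompts.length * q - r * q)) := by ring_nf
        _ = r + prompts.length * q := by rw [Nat.add_sub_cancel' h3]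
        _ = m := by omega
    clear_value q r
    clear hq_def hr_def
    -- A side: the foldl-with-extend is a flatMap, then the block decomposition
    rw [PySem.List.foldl_append_eq_flatMap
      (fun ip : Int × String =>
        PySem.List.pyRepeat [ip.2] (if ip.1 < (r : Int) then (q : Int) + 1 else (q : Int)))]
    rw [List.nil_append]
    simp only [pv_pyRepeat_count]
    have hA : PySem.List.enumerate prompts 0 = PySem.List.enumerate prompts ((0 : Nat) : Int) := by
      norm_num
    rw [hA, pv_enum_blocks prompts 0 r q, Nat.sub_zero]
    -- B side: split range(m) at the cut r*(q+1)
    rw [PySem.List.pyRange_one]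
    rw [show (((m : Int) - 0).toNat) = m by omega]
    rw [List.map_map]
    rw [show List.range m = List.range (r * (q + 1) + (prompts.length - r) * q) from by rw [hkey]]
    rw [List.range_add, List.map_append, List.map_map]
    congr 1
    · -- first block: slots below the cut
      have htl : (prompts.take r).length = r := by
        rw [List.length_take]; omega
      have h1 : ∀ j ∈ List.range (r * (q + 1)),
          ((fun j : Int =>
              if j < ((r : Nat) : Int) * (((q : Nat) : Int) + 1) then
                PySem.List.pyGetD prompts (PySem.Int.floordiv j (((q : Nat) : Int) + 1)) ""
              else
                PySem.List.pyGetD prompts (((r : Nat) : Int) + PySem.Int.floordiv (j - ((r : Nat) : Int) * (((q : Nat) : Int) + 1)) ((q : Nat) : Int)) "")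
            ∘ (fun k : Nat => (0 : Int) + (k : Int))) j
          = (prompts.take r).getD (j / (q + 1)) "" := by
        intro j hj
        rw [List.mem_range] at hj
        simp only [Function.comp, zero_add]
        rw [if_pos (by exact_mod_cast hj)]
        rw [show (((q : Nat) : Int) + 1) = ((q + 1 : Nat) : Int) by push_cast; ring]
        rw [PySem.Int.floordiv_natCast, PySem.List.pyGetD_natCast]
        have hjr : j / (q + 1) < r := by
          rw [Nat.div_lt_iff_lt_mul (by omega : 0 < q + 1)]
          exact hj
        rw [List.getD_eq_getElem?_getD, List.getD_eq_getElem?_getD,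
          List.getElem?_take_of_lt hjr]
      rw [List.map_congr_left h1]
      have hmr := pv_map_range_div (prompts.take r) (q + 1)
      rw [htl] at hmr
      exact hmr.symm
    · -- second block: slots at or beyond the cut
      have h2' : ∀ t ∈ List.range ((prompts.length - r) * q),
          (((fun j : Int =>
              if j < ((r : Nat) : Int) * (((q : Nat) : Int) + 1) then
                PySem.List.pyGetD prompts (PySem.Int.floordiv j (((q : Nat) : Int) + 1)) ""
              else
                PySem.List.pyGetD prompts (((r : Nat) : Int) + PySem.Int.floordiv (j - ((r : Nat) : Int) * (((q : Nat) : Int) + 1)) ((q : Nat) : Int)) "")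
            ∘ (fun k : Nat => (0 : Int) + (k : Int))) ∘ (fun x : Nat => r * (q + 1) + x)) t
          = (prompts.drop r).getD (t / q) "" := by
        intro t _
        simp only [Function.comp, zero_add]
        rw [if_neg (by push_cast; omega)]
        rw [show ((((r * (q + 1) + t : Nat)) : Int) - ((r : Nat) : Int) * (((q : Nat) : Int) + 1)) = ((t : Nat) : Int) by push_cast; ring]
        rw [PySem.Int.floordiv_natCast]
        rw [show (((r : Nat) : Int) + ((t / q : Nat) : Int)) = ((r + t / q : Nat) : Int) by push_cast; ring]
        rw [PySem.List.pyGetD_natCast]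
        rw [List.getD_eq_getElem?_getD, List.getD_eq_getElem?_getD, List.getElem?_drop]
      have hdl : (prompts.drop r).length = prompts.length - r := List.length_drop
      rw [List.map_congr_left h2']
      have hmr2 := pv_map_range_div (prompts.drop r) q
      rw [hdl] at hmr2
      exact hmr2.symm

-- ===== VERDICT (by name: the statement is the Claim_ definition above) =====
theorem distribute_personal_prompts_py_spec : Claim_equal_distribute_personal_prompts_py := by
  intro prompts agent_count _
  exact distribute_personal_prompts_py_spec' prompts agent_count
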